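-- pv_equiv track=rewrite | github.com/AnVales/code_signal_arcade | Intro/6 - Rains of Reason/alphabeticShift.py | solution
-- ===== SOURCE A (Python) =====
-- def solution(inputString):
--     outputList = []
--
--     # Alphabet list
--     import string
--     alphabet_string = string.ascii_lowercase
--     alphabet_list = list(alphabet_string)
--
--     # Find the letter and replace with the next letter
--     for letter in inputString:
--         for index, alphabet in enumerate(alphabet_list):
--             if letter == alphabet and index+1<len(alphabet_list):
--                 outputList.append(alphabet_list[index+1])
--             elif letter == alphabet and not index+1<len(alphabet_list):
--                 outputList.append(alphabet_list[0])
--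
--     # Convert List to String Python
--     outputString = ''.join(str(item) for item in outputList)
--
--     return outputString
-- ===== SOURCE B (Python) =====
-- def solution(inputString):
--     return ''.join(chr((ord(c) - 97 + 1) % 26 + 97)
--                    for c in inputString if 'a' <= c <= 'z')
-- ===== Notes on version B (the rewrite author's own statement) =====
-- stated objective: faster
-- what changed: Replace the inner scan over a 26-letter alphabet list with closed-form character arithmetic chr((ord(c)-97+1)%26+97) in a single pass, keeping only lowercase letters.
import Mathlib
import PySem

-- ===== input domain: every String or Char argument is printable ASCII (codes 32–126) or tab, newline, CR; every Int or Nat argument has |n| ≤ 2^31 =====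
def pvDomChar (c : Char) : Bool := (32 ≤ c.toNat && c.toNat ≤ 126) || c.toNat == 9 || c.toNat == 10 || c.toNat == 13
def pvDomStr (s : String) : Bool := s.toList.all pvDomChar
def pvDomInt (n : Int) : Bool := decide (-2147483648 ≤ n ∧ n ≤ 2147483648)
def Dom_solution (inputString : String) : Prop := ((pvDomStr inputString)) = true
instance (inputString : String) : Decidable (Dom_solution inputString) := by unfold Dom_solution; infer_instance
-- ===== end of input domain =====

-- B replaces A's inner scan over a 26-letter list with closed-form character arithmetic in one pass (constant-factor faster).

-- ===== PORT A =====
-- string.ascii_lowercase as a list of characters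
def pvAlpha : List Char := "abcdefghijklmnopqrstuvwxyz".toList

-- the inner `for index, alphabet in enumerate(alphabet_list)` loop of A
def pvInnerA (letter : Char) (out : List Char) : List Char :=
  (PySem.List.enumerate pvAlpha).foldl (fun out2 p =>
    if letter = p.2 ∧ p.1 + 1 < (pvAlpha.length : Int) then
      out2 ++ [pvAlpha.getD (p.1 + 1).toNat ' ']
    else if letter = p.2 ∧ ¬ (p.1 + 1 < (pvAlpha.length : Int)) then
      out2 ++ [pvAlpha.getD 0 ' ']
    else out2) out

def solution (inputString : String) : String :=
  String.mk (inputString.toList.foldl (fun out letter => pvInnerA letter out) [])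

-- ===== PORT B =====
def pvShift (c : Char) : Option Char :=
  if 'a' ≤ c ∧ c ≤ 'z' then some (Char.ofNat ((c.toNat - 97 + 1) % 26 + 97)) else none

def solution_alt (inputString : String) : String :=
  String.mk (inputString.toList.filterMap pvShift)

-- ===== PRECONDITION & SPEC =====
def Spec_solution (inputString : String) (out : String) : Prop := out = solution_alt inputString
instance (inputString : String) (out : String) : Decidable (Spec_solution inputString out) := by unfold Spec_solution; infer_instance

-- ===== CLAIM (what is proved, stated in full; the proofs are below) =====
def Claim_equal_solution : Prop := ∀ (inputString : String), Dom_solution inputString → Spec_solution inputString (solution inputString)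

-- ===== LEMMAS AND PROOFS =====

-- the inner fold only appends to its accumulator
theorem pvInnerA_acc (letter : Char) (out : List Char) :
    pvInnerA letter out = out ++ pvInnerA letter [] := by
  unfold pvInnerA
  generalize PySem.List.enumerate pvAlpha = l
  induction l generalizing out with
  | nil => simp
  | cons p l ih =>
    simp only [List.foldl_cons]
    split_ifs <;> rw [ih] <;> (try conv_rhs => rw [ih]) <;> simp

-- the inner fold computes pvShift, for every character of the domain
set_option maxRecDepth 20000 in
theorem pvInnerA_char (n : Nat) (hn : n < 127) :
    pvInnerA (Char.ofNat n) [] = (pvShift (Char.ofNat n)).toList := by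
  revert hn
  revert n
  decide

theorem pvOuter (l : List Char) (h : ∀ c ∈ l, pvDomChar c = true) (out : List Char) :
    l.foldl (fun out letter => pvInnerA letter out) out = out ++ l.filterMap pvShift := by
  induction l generalizing out with
  | nil => simp
  | cons c l ih =>
    have hc : pvDomChar c = true := h c (by simp)
    have hlt : c.toNat < 127 := by
      simp [pvDomChar] at hc
      omega
    have hco : Char.ofNat c.toNat = c := Char.ofNat_toNat c
    have hkey : pvInnerA c [] = (pvShift c).toList := by
      rw [← hco]; exact pvInnerA_char c.toNat hlt
    simp only [List.foldl_cons]
    rw [pvInnerA_acc, ih (fun d hd => h d (by simp [hd]))]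
    cases hps : pvShift c <;> simp [hkey, hps]

-- ===== VERDICT (by name: the statement is the Claim_ definition above) =====
theorem solution_spec : Claim_equal_solution := by
  intro s hdom
  unfold Spec_solution solution solution_alt
  have h : ∀ c ∈ s.toList, pvDomChar c = true := by
    have := hdom
    unfold Dom_solution pvDomStr at this
    simpa [List.all_eq_true] using this
  rw [pvOuter s.toList h []]
  simp
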